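-- pv_equiv track=rewrite | github.com/ParthaPritamDeka/Problem-Solving | largest_substring_between_two_characters.py | solve
-- ===== SOURCE A (Python) =====
-- def solve(s):
--    memo = {}
--    for i in range(len(s)):
--       if s[i] in memo:
--          memo[s[i]].append(i)
--       else:
--          memo[s[i]] = [i]
--
--    best = 0
--    for key in memo:
--       best = max(best, memo[key][-1] - memo[key][0])
--    return best - 1
-- ===== SOURCE B (Python) =====
-- def solve(s):
--    first = {}
--    best = 0
--    for i, c in enumerate(s):
--       if c in first:
--          best = max(best, i - first[c])
--       else:
--          first[c] = i
--    return best - 1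
-- ===== Notes on version B (the rewrite author's own statement) =====
-- stated objective: simpler
-- what changed: Single pass keeping only each character's first-seen index and a running maximum, instead of building per-character index lists and aggregating them in a second loop over the dict.
import Mathlib
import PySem

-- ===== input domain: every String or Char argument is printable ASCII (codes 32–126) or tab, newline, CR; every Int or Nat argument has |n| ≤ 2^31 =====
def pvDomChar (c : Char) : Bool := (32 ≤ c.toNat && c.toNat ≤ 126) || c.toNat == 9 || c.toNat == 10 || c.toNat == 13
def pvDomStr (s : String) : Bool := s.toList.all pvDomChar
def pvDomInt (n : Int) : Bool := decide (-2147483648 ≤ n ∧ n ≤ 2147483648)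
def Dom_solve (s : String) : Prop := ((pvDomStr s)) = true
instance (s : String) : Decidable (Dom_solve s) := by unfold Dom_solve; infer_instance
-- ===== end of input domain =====

-- B replaces A's per-character index lists and second aggregation loop over the dict by a
-- single pass keeping only each character's first-seen index and a running maximum (simpler).

-- ===== PORT A =====
def solve (s : String) : Int :=
  let memo := (PySem.List.enumerate s.toList 0).foldl
    (fun d p => if d.contains p.2 then d.modify p.2 [] (fun v => v ++ [p.1]) else d.insert p.2 [p.1])
    PySem.Dict.empty
  let best := memo.keys.foldl
    (fun b k => max b (PySem.List.pyGetD (memo.getD k []) (-1) 0 - PySem.List.pyGetD (memo.getD k []) 0 0))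
    0
  best - 1

-- ===== PORT B =====
def solve_alt (s : String) : Int :=
  let r := (PySem.List.enumerate s.toList 0).foldl
    (fun st p => if st.1.contains p.2 then (st.1, max st.2 (p.1 - st.1.getD p.2 0))
                 else (st.1.insert p.2 p.1, st.2))
    (PySem.Dict.empty, 0)
  r.2 - 1

-- ===== PRECONDITION & SPEC =====
def Spec_solve (s : String) (out : Int) : Prop := out = solve_alt s
instance (s : String) (out : Int) : Decidable (Spec_solve s out) := by unfold Spec_solve; infer_instance

-- ===== CLAIM (what is proved, stated in full; the proofs are below) =====
def Claim_equal_solve : Prop := ∀ (s : String), Dom_solve s → Spec_solve s (solve s)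

-- ===== LEMMAS AND PROOFS =====

-- A's memo-building loop and B's loop, over an arbitrary enumerated list
def pvMemo (l : List (Int × Char)) : PySem.Dict Char (List Int) :=
  l.foldl
    (fun d p => if d.contains p.2 then d.modify p.2 [] (fun v => v ++ [p.1]) else d.insert p.2 [p.1])
    PySem.Dict.empty

def pvB (l : List (Int × Char)) : PySem.Dict Char Int × Int :=
  l.foldl
    (fun st p => if st.1.contains p.2 then (st.1, max st.2 (p.1 - st.1.getD p.2 0))
                 else (st.1.insert p.2 p.1, st.2))
    (PySem.Dict.empty, 0)

-- the list of indices at which c occurs in l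
def pvOcc (l : List (Int × Char)) (c : Char) : List Int :=
  (l.filter (fun p => p.2 == c)).map (·.1)

-- "last occurrence minus first occurrence" of character k
def pvGap (l : List (Int × Char)) (k : Char) : Int :=
  (pvOcc l k).getLastD 0 - (pvOcc l k).headD 0

-- A's aggregated best, phrased over the distinct characters
def pvG (l : List (Int × Char)) : Int :=
  (PySem.Set.ofList (l.map (·.2))).foldl (fun b k => max b (pvGap l k)) 0

lemma pvOcc_append (l : List (Int × Char)) (q : Int × Char) (c : Char) :
    pvOcc (l ++ [q]) c = pvOcc l c ++ (if q.2 == c then [q.1] else []) := by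
  simp [pvOcc, List.filter_append]
  split_ifs <;> simp_all

lemma pvOcc_ne_nil_iff (l : List (Int × Char)) (c : Char) :
    pvOcc l c ≠ [] ↔ c ∈ PySem.Set.ofList (l.map (·.2)) := by
  simp [pvOcc, PySem.Set.mem_ofList]

lemma pvOcc_mem_lt (l : List (Int × Char)) (i : Int) (hlt : ∀ p ∈ l, p.1 < i)
    (c : Char) (j : Int) (hj : j ∈ pvOcc l c) : j < i := by
  simp only [pvOcc, List.mem_map, List.mem_filter] at hj
  obtain ⟨p, ⟨hp, _⟩, rfl⟩ := hj
  exact hlt p hp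

lemma pvMemo_getD (l : List (Int × Char)) (c : Char) :
    (pvMemo l).getD c [] = pvOcc l c ∧
    (pvMemo l).contains c = !(pvOcc l c).isEmpty := by
  induction l using List.reverseRecOn generalizing c with
  | nil => simp [pvMemo, pvOcc]
  | append_singleton l q ih =>
      have hstep : pvMemo (l ++ [q]) =
          (if (pvMemo l).contains q.2 then (pvMemo l).modify q.2 [] (fun v => v ++ [q.1])
           else (pvMemo l).insert q.2 [q.1]) := by
        simp [pvMemo, List.foldl_append]
      rw [hstep, pvOcc_append]
      by_cases h : (pvMemo l).contains q.2 = true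
      · have hocc : pvOcc l q.2 ≠ [] := by
          have := (ih q.2).2; rw [h] at this
          simpa [List.isEmpty_iff] using this.symm
        simp only [h, if_true]
        constructor
        · rw [PySem.Dict.getD_modify, (ih c).1]
          by_cases hc : c = q.2
          · simp [hc, (ih q.2).1]
          · have hc' : ¬ q.2 = c := fun h => hc h.symm
            simp [hc, hc']
        · rw [PySem.Dict.contains_modify, (ih c).2]
          by_cases hc : c = q.2
          · simp [hc, hocc]
          · have hc' : ¬ q.2 = c := fun h => hc h.symm
            simp [hc, hc']
      · have hocc : pvOcc l q.2 = [] := by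
          have h' : (pvMemo l).contains q.2 = false := by simpa using h
          have := (ih q.2).2; rw [h'] at this
          simpa [List.isEmpty_iff] using this.symm
        rw [if_neg h]
        constructor
        · rw [PySem.Dict.getD_insert, (ih c).1]
          by_cases hc : c = q.2
          · simp [hc, hocc]
          · have hc' : ¬ q.2 = c := fun h => hc h.symm
            simp [hc, hc']
        · rw [PySem.Dict.contains_insert, (ih c).2]
          by_cases hc : c = q.2
          · simp [hc, hocc]
          · have hc' : ¬ q.2 = c := fun h => hc h.symm
            simp [hc, hc']

lemma pvMemo_keys (l : List (Int × Char)) :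
    (pvMemo l).keys = PySem.Set.ofList (l.map (·.2)) := by
  induction l using List.reverseRecOn with
  | nil => simp [pvMemo]
  | append_singleton l q ih =>
      have hstep : pvMemo (l ++ [q]) =
          (if (pvMemo l).contains q.2 then (pvMemo l).modify q.2 [] (fun v => v ++ [q.1])
           else (pvMemo l).insert q.2 [q.1]) := by
        simp [pvMemo, List.foldl_append]
      rw [hstep]
      rw [List.map_append, List.map_cons, List.map_nil, PySem.Set.ofList_append_singleton]
      by_cases h : (pvMemo l).contains q.2 = true
      · have hmem : q.2 ∈ PySem.Set.ofList (l.map (·.2)) := by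
          rw [← ih]; exact (PySem.Dict.contains_iff_mem_keys _ _).1 h
        simp only [h, if_true]
        rw [PySem.Dict.keys_modify, PySem.Dict.keys_insert_of_contains _ _ h, ih,
          PySem.Set.add_of_mem hmem]
      · have hmem : q.2 ∉ PySem.Set.ofList (l.map (·.2)) := by
          rw [← ih]; intro hm
          exact h ((PySem.Dict.contains_iff_mem_keys _ _).2 hm)
        rw [if_neg h, PySem.Dict.keys_insert_of_not_contains _ _ (by simpa using h), ih,
          PySem.Set.add_of_not_mem hmem]

lemma foldl_max_start (ks : List Char) (f : Char → Int) (a x : Int) :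
    ks.foldl (fun b k => max b (f k)) (max a x) = max (ks.foldl (fun b k => max b (f k)) a) x := by
  induction ks generalizing a with
  | nil => rfl
  | cons k ks ih =>
      simp only [List.foldl_cons]
      rw [max_right_comm a x (f k), ih]

lemma foldl_max_replace (ks : List Char) (f f' : Char → Int) (c₀ : Char)
    (hnd : ks.Nodup) (hmem : c₀ ∈ ks)
    (hoff : ∀ k ∈ ks, k ≠ c₀ → f' k = f k) (hle : f c₀ ≤ f' c₀) :
    ks.foldl (fun b k => max b (f' k)) 0 = max (ks.foldl (fun b k => max b (f k)) 0) (f' c₀) := by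
  have hperm : ks.Perm (c₀ :: ks.erase c₀) := List.perm_cons_erase hmem
  have hrest : ∀ k ∈ ks.erase c₀, k ≠ c₀ ∧ k ∈ ks := by
    intro k hk; exact ⟨(hnd.mem_erase_iff.mp hk).1, (hnd.mem_erase_iff.mp hk).2⟩
  rw [hperm.foldl_eq (rcomm := ⟨fun b x y => max_right_comm b (f' x) (f' y)⟩) 0,
      hperm.foldl_eq (rcomm := ⟨fun b x y => max_right_comm b (f x) (f y)⟩) 0]
  simp only [List.foldl_cons]
  rw [PySem.List.foldl_congr_mem _ (fun b k => max b (f' k)) (fun b k => max b (f k)) _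
      (fun acc k hk => by dsimp only; rw [hoff k (hrest k hk).2 (hrest k hk).1])]
  rw [foldl_max_start, foldl_max_start, max_assoc, max_eq_right hle]

lemma foldl_max_fresh (ks : List Char) (f f' : Char → Int) (c₀ : Char)
    (hnot : c₀ ∉ ks) (hoff : ∀ k ∈ ks, k ≠ c₀ → f' k = f k) (hle : f' c₀ ≤ 0) :
    (ks ++ [c₀]).foldl (fun b k => max b (f' k)) 0 = ks.foldl (fun b k => max b (f k)) 0 := by
  rw [List.foldl_append]
  simp only [List.foldl_cons, List.foldl_nil]
  rw [PySem.List.foldl_congr_mem _ (fun b k => max b (f' k)) (fun b k => max b (f k)) _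
      (fun acc k hk => by dsimp only; rw [hoff k hk (fun h => hnot (h ▸ hk))])]
  exact max_eq_left (hle.trans (PySem.List.le_foldl_max_int ks f 0).1)

lemma pyGetD_neg_one (v : List Int) (h : v ≠ []) :
    PySem.List.pyGetD v (-1) 0 = v.getLastD 0 := by
  obtain ⟨x, t, rfl⟩ := List.exists_cons_of_ne_nil h
  simp only [PySem.List.pyGetD, PySem.List.pyGet?, PySem.List.pyIdx?]
  split_ifs with h1 h2 h3
  · omega
  · omega
  · simp only [Option.bind]
    rw [show ((x :: t).length - ((-(-1 : Int)).toNat)) = t.length from rfl,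
        show t.length = (x :: t).length - 1 from rfl,
        ← List.getLast?_eq_getElem?, ← List.getLastD_eq_getLast?]
  · exfalso; apply h3; simp only [List.length_cons]; push_cast; omega

lemma pyGetD_zero (v : List Int) (h : v ≠ []) :
    PySem.List.pyGetD v 0 0 = v.headD 0 := by
  obtain ⟨x, t, rfl⟩ := List.exists_cons_of_ne_nil h
  simp [PySem.List.pyGetD, PySem.List.pyGet?, PySem.List.pyIdx?]

lemma pvB_invariant (l : List (Int × Char)) (hp : l.Pairwise (fun p q => p.1 < q.1)) :
    (∀ c, (pvB l).1.get? c = (pvOcc l c).head?) ∧ (pvB l).2 = pvG l := by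
  induction l using List.reverseRecOn with
  | nil => exact ⟨fun c => by simp [pvB, pvOcc, PySem.Dict.get?_empty], by simp [pvB, pvG]⟩
  | append_singleton l q ih =>
      rw [List.pairwise_append] at hp
      obtain ⟨hpl, -, hlt⟩ := hp
      have hlt' : ∀ p ∈ l, p.1 < q.1 := fun p hp => hlt p hp q (by simp)
      obtain ⟨ihd, ihb⟩ := ih hpl
      have hstep : pvB (l ++ [q]) =
          (if (pvB l).1.contains q.2 then
            ((pvB l).1, max (pvB l).2 (q.1 - (pvB l).1.getD q.2 0))
           else ((pvB l).1.insert q.2 q.1, (pvB l).2)) := by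
        simp [pvB, List.foldl_append]
      have hGkeys : (l ++ [q]).map (·.2) = l.map (·.2) ++ [q.2] := by simp
      by_cases hc : (pvB l).1.contains q.2 = true
      · -- q.2 was seen before
        have hocc : pvOcc l q.2 ≠ [] := by
          intro h0
          have := PySem.Dict.contains_eq_isSome_get? (pvB l).1 q.2
          rw [hc, ihd q.2, h0] at this; simp at this
        obtain ⟨y, ys, hys⟩ := List.exists_cons_of_ne_nil hocc
        have hmem : q.2 ∈ PySem.Set.ofList (l.map (·.2)) := (pvOcc_ne_nil_iff l q.2).1 hocc
        constructor
        · intro c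
          rw [hstep]; simp only [hc, if_true]
          rw [ihd c, pvOcc_append]
          by_cases hcq : q.2 = c
          · subst hcq
            rw [hys]; simp
          · simp [hcq]
        · rw [hstep]; simp only [hc, if_true]
          have hd : (pvB l).1.getD q.2 0 = (pvOcc l q.2).headD 0 := by
            rw [PySem.Dict.getD_eq_get?_getD, ihd q.2, hys]; rfl
          rw [ihb, hd]
          have hgap' : pvGap (l ++ [q]) q.2 = q.1 - (pvOcc l q.2).headD 0 := by
            rw [pvGap, pvOcc_append, hys]
            simp only [if_pos (by simp : (q.2 == q.2) = true)]
            rw [show y :: ys ++ [q.1] = (y :: ys) ++ [q.1] from rfl,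
              List.getLastD_eq_getLast?, List.getLast?_concat]
            simp
          have hle : pvGap l q.2 ≤ pvGap (l ++ [q]) q.2 := by
            rw [hgap']
            have hmemlast : (pvOcc l q.2).getLastD 0 ∈ pvOcc l q.2 := by
              rw [hys, List.getLastD_eq_getLast?,
                List.getLast?_eq_some_getLast (by simp : (y :: ys) ≠ [])]
              exact List.getLast_mem _
            have := pvOcc_mem_lt l q.1 hlt' q.2 _ hmemlast
            simp only [pvGap]; omega
          have hoff : ∀ k ∈ PySem.Set.ofList (l.map (·.2)), k ≠ q.2 →
              pvGap (l ++ [q]) k = pvGap l k := by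
            intro k _ hk
            have : ¬ q.2 = k := fun h => hk h.symm
            simp [pvGap, pvOcc_append, this]
          rw [pvG, pvG, hGkeys, PySem.Set.ofList_append_singleton, PySem.Set.add_of_mem hmem,
            foldl_max_replace _ (pvGap l) (pvGap (l ++ [q])) q.2 (PySem.Set.nodup_ofList _)
              hmem hoff hle, hgap']
      · -- q.2 is new
        have hocc : pvOcc l q.2 = [] := by
          have h2 : (pvOcc l q.2).head?.isSome = false := by
            rw [← ihd q.2, ← PySem.Dict.contains_eq_isSome_get?]
            simpa using hc
          cases hE : pvOcc l q.2 with
          | nil => rfl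
          | cons a t => rw [hE] at h2; simp at h2
        have hnot : q.2 ∉ PySem.Set.ofList (l.map (·.2)) := by
          intro hm; exact ((pvOcc_ne_nil_iff l q.2).2 hm) hocc
        constructor
        · intro c
          rw [hstep, if_neg hc]
          rw [PySem.Dict.get?_insert, pvOcc_append]
          by_cases hcq : c = q.2
          · subst hcq; simp [hocc]
          · have hc' : ¬ q.2 = c := fun h => hcq h.symm
            simp [hcq, hc', ihd c]
        · rw [hstep, if_neg hc]
          rw [ihb]
          have hgap0 : pvGap (l ++ [q]) q.2 ≤ 0 := by
            simp [pvGap, pvOcc_append, hocc]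
          have hoff : ∀ k ∈ PySem.Set.ofList (l.map (·.2)), k ≠ q.2 →
              pvGap (l ++ [q]) k = pvGap l k := by
            intro k _ hk
            have : ¬ q.2 = k := fun h => hk h.symm
            simp [pvGap, pvOcc_append, this]
          rw [pvG, pvG, hGkeys, PySem.Set.ofList_append_singleton, PySem.Set.add_of_not_mem hnot,
            foldl_max_fresh _ (pvGap l) (pvGap (l ++ [q])) q.2 hnot hoff hgap0]

-- ===== VERDICT (by name: the statement is the Claim_ definition above) =====
theorem solve_spec : Claim_equal_solve := by
  intro s _
  unfold Spec_solve
  have hA : solve s =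
      ((pvMemo (PySem.List.enumerate s.toList 0)).keys.foldl
        (fun b k => max b
          (PySem.List.pyGetD ((pvMemo (PySem.List.enumerate s.toList 0)).getD k []) (-1) 0 -
           PySem.List.pyGetD ((pvMemo (PySem.List.enumerate s.toList 0)).getD k []) 0 0)) 0) - 1 := rfl
  have hB : solve_alt s = (pvB (PySem.List.enumerate s.toList 0)).2 - 1 := rfl
  rw [hA, hB,
    (pvB_invariant (PySem.List.enumerate s.toList 0) (PySem.List.pairwise_lt_enumerate _ _)).2]
  congr 1
  rw [pvMemo_keys]
  apply PySem.List.foldl_congr_mem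
  intro acc k hk
  have hocc : pvOcc (PySem.List.enumerate s.toList 0) k ≠ [] := by
    rw [pvOcc_ne_nil_iff]
    exact hk
  rw [(pvMemo_getD _ k).1, pyGetD_neg_one _ hocc, pyGetD_zero _ hocc]
  rfl
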